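-- pv_equiv track=rewrite | github.com/jaybeeuu/decypher | decypher/word_index.py | get_word_signature
-- ===== SOURCE A (Python) =====
-- def get_word_signature(word: str) -> str:
--   unique_letter_index = 65
--   letters = {}
--   signature = ""
--
--   for char in word:
--     if char not in letters:
--       letters[char] = chr(unique_letter_index)
--       unique_letter_index += 1
--
--     signature += f'{letters[char]}'
--
--   return signature
-- ===== SOURCE B (Python) =====
-- def get_word_signature(word: str) -> str:
--   # No mapping table at all: the code letter of each character c is determined
--   # positionally — 65 plus the number of distinct characters occurring strictly
--   # before c's first occurrence in the word.
--   return ''.join(chr(65 + len(set(word[:word.index(c)]))) for c in word)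
-- ===== Notes on version B (the rewrite author's own statement) =====
-- stated objective: alternative
-- what changed: A builds a char->letter dict incrementally in one stateful pass; B keeps no state at all and computes each output letter positionally as 65 + the number of distinct characters before that character's first occurrence (set of the prefix up to word.index(c)), which equals the first-appearance rank.
import Mathlib
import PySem

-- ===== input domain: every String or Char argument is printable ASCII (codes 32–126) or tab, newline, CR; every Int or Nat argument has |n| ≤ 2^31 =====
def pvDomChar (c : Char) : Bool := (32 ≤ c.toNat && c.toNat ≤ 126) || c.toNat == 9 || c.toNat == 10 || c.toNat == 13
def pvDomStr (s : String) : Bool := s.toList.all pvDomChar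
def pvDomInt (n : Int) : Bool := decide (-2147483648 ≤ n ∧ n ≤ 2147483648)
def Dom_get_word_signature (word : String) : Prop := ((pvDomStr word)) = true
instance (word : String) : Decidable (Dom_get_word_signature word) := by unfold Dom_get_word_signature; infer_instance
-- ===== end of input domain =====

-- B drops A's incremental dict entirely: each output letter is computed positionally as
-- 65 + the number of distinct characters strictly before that character's first occurrence.

-- ===== PORT A =====
-- the body of A's for-loop: state (letters, unique_letter_index, signature)
def pvStepA (st : PySem.Dict Char Char × Int × List Char) (c : Char) :
    PySem.Dict Char Char × Int × List Char :=
  let letters := st.1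
  let idx := st.2.1
  let sig := st.2.2
  let p := if letters.contains c = false
           then (letters.insert c (Char.ofNat idx.toNat), idx + 1)
           else (letters, idx)
  (p.1, p.2, sig ++ [p.1.getD c ' '])

def get_word_signature (word : String) : String :=
  let r := word.toList.foldl pvStepA (PySem.Dict.empty, 65, [])
  String.ofList r.2.2

-- ===== PORT B =====
-- ''.join(chr(65 + len(set(word[:word.index(c)]))) for c in word)
-- word.index(c) never raises here (c is drawn from word itself), so it is List.idxOf,
-- exact on every admitted input; set(...) is PySem.Set.ofList, len = List.length.
def get_word_signature_alt (word : String) : String :=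
  String.ofList (word.toList.map (fun c =>
    Char.ofNat (65 + (PySem.Set.ofList (word.toList.take (word.toList.idxOf c))).length)))

-- ===== PRECONDITION & SPEC =====
def Spec_get_word_signature (word : String) (out : String) : Prop := out = get_word_signature_alt word
instance (word : String) (out : String) : Decidable (Spec_get_word_signature word out) := by unfold Spec_get_word_signature; infer_instance

-- ===== CLAIM (what is proved, stated in full; the proofs are below) =====
def Claim_equal_get_word_signature : Prop := ∀ (word : String), Dom_get_word_signature word → Spec_get_word_signature word (get_word_signature word)

-- ===== LEMMAS AND PROOFS =====

-- ---- facts about PySem.Set.add / dedup ----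
theorem pvSet_add_eq (s : List Char) (x : Char) :
    PySem.Set.add s x = if x ∈ s then s else s ++ [x] := by
  simp [PySem.Set.add, PySem.Set.contains]

theorem pvFoldlAdd_append (l : List Char) (ds : List Char) :
    ∃ ext, l.foldl PySem.Set.add ds = ds ++ ext := by
  induction l generalizing ds with
  | nil => exact ⟨[], by simp⟩
  | cons c l ih =>
    simp only [List.foldl_cons]
    rcases ih (PySem.Set.add ds c) with ⟨ext, hext⟩
    rw [hext, pvSet_add_eq]
    by_cases hc : c ∈ ds
    · exact ⟨ext, by simp [hc]⟩
    · exact ⟨c :: ext, by simp [hc]⟩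

theorem pvIdxOf_foldl_add (l : List Char) (ds : List Char) (c : Char) (hc : c ∈ ds) :
    (l.foldl PySem.Set.add ds).idxOf c = ds.idxOf c := by
  rcases pvFoldlAdd_append l ds with ⟨ext, hext⟩
  rw [hext, List.idxOf_append_of_mem hc]

theorem pvDedup_eq_foldl_add (l : List Char) :
    PySem.List.dedup l = l.foldl PySem.Set.add [] := by
  rw [PySem.List.dedup_eq_ofList, PySem.Set.ofList_eq_foldl]

-- ---- A's loop produces, at each position, 65 + first-appearance rank ----
-- the code table A's letters dict equals after seeing distinct characters ds
def pvDictOf (ds : List Char) : PySem.Dict Char Char :=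
  (PySem.List.enumerate ds 0).foldl
      (fun (d : PySem.Dict Char Char) p => d.insert p.2 (Char.ofNat (65 + p.1).toNat)) PySem.Dict.empty

theorem pvDictOf_items (ds : List Char) (hnd : ds.Nodup) :
    (pvDictOf ds).items
      = (PySem.List.enumerate ds 0).map (fun p => (p.2, Char.ofNat (65 + p.1).toNat)) := by
  unfold pvDictOf
  rw [PySem.Dict.items_foldl_insert_fresh]
  · simp [PySem.Dict.empty]
  · intro a _; exact PySem.Dict.contains_empty _
  · rw [PySem.List.map_snd_enumerate]; exact hnd

theorem pvDictOf_keys (ds : List Char) (hnd : ds.Nodup) : (pvDictOf ds).keys = ds := by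
  simp only [PySem.Dict.keys, pvDictOf_items ds hnd, List.map_map]
  exact PySem.List.map_snd_enumerate ds 0

theorem pvDictOf_getD (ds : List Char) (hnd : ds.Nodup) (c : Char) (hc : c ∈ ds) :
    (pvDictOf ds).getD c ' ' = Char.ofNat (65 + ds.idxOf c) := by
  have hk : ds.idxOf c < ds.length := List.idxOf_lt_length_of_mem hc
  have hmem : ((0 : Int) + ds.idxOf c, ds[ds.idxOf c]) ∈ PySem.List.enumerate ds 0 := by
    rw [PySem.List.mem_enumerate_iff]; exact ⟨ds.idxOf c, hk, rfl⟩
  have hmem2 : (c, Char.ofNat (65 + ds.idxOf c)) ∈ (pvDictOf ds).items := by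
    rw [pvDictOf_items ds hnd]
    refine List.mem_map.2 ⟨_, hmem, ?_⟩
    show (ds[ds.idxOf c], Char.ofNat ((65 : Int) + ((0 : Int) + ds.idxOf c)).toNat) = _
    rw [List.getElem_idxOf]
    refine Prod.ext rfl ?_
    show Char.ofNat _ = Char.ofNat _
    congr 1
    omega
  apply PySem.Dict.getD_of_mem_items
  · exact hmem2
  · rw [pvDictOf_keys ds hnd]; exact hnd

theorem pvDictOf_contains (ds : List Char) (hnd : ds.Nodup) (c : Char) :
    (pvDictOf ds).contains c = decide (c ∈ ds) := by
  rw [PySem.Dict.contains_eq_decide_mem_keys, pvDictOf_keys ds hnd]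

theorem pvDictOf_snoc (ds : List Char) (hnd : ds.Nodup) (c : Char) (hc : c ∉ ds) :
    (pvDictOf ds).insert c (Char.ofNat (65 + ds.length)) = pvDictOf (ds ++ [c]) := by
  have hnd2 : (ds ++ [c]).Nodup := by
    simp [List.nodup_append, hnd]
    exact fun a ha h => hc (h ▸ ha)
  apply PySem.Dict.ext
  rw [PySem.Dict.items_insert_of_not_contains, pvDictOf_items ds hnd,
      pvDictOf_items _ hnd2, PySem.List.enumerate_append]
  · simp
    congr 1
  · rw [pvDictOf_contains ds hnd c]; simpa using hc

theorem pvStepA_mem (ds : List Char) (hnd : ds.Nodup) (i : Int) (sig : List Char)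
    (c : Char) (hc : c ∈ ds) :
    pvStepA (pvDictOf ds, i, sig) c
      = (pvDictOf ds, i, sig ++ [Char.ofNat (65 + ds.idxOf c)]) := by
  unfold pvStepA
  simp only [pvDictOf_contains ds hnd c, hc, decide_true]
  simp [pvDictOf_getD ds hnd c hc]

theorem pvStepA_new (ds : List Char) (hnd : ds.Nodup) (sig : List Char)
    (c : Char) (hc : c ∉ ds) :
    pvStepA (pvDictOf ds, (65 : Int) + ds.length, sig) c
      = (pvDictOf (ds ++ [c]), (65 : Int) + (ds ++ [c]).length,
         sig ++ [Char.ofNat (65 + (ds ++ [c]).idxOf c)]) := by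
  have hnd2 : (ds ++ [c]).Nodup := by
    simp [List.nodup_append, hnd]
    exact fun a ha h => hc (h ▸ ha)
  have htn : ((65 : Int) + ds.length).toNat = 65 + ds.length := by omega
  unfold pvStepA
  simp only [pvDictOf_contains ds hnd c, hc, decide_false]
  simp only [htn, pvDictOf_snoc ds hnd c hc]
  refine Prod.ext rfl (Prod.ext ?_ ?_)
  · show (65 : Int) + ds.length + 1 = (65 : Int) + (ds ++ [c]).length
    simp; omega
  · show sig ++ [(pvDictOf (ds ++ [c])).getD c ' '] = _
    rw [pvDictOf_getD _ hnd2 c (by simp)]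

theorem pvLoopA (l : List Char) (ds : List Char) (sig : List Char) (hnd : ds.Nodup) :
    (l.foldl pvStepA (pvDictOf ds, ((65 : Int) + ds.length), sig)).2.2
    = sig ++ l.map (fun c => Char.ofNat (65 + (l.foldl PySem.Set.add ds).idxOf c)) := by
  induction l generalizing ds sig with
  | nil => simp
  | cons c l ih =>
    simp only [List.foldl_cons, List.map_cons, pvSet_add_eq]
    by_cases hc : c ∈ ds
    · rw [pvStepA_mem ds hnd _ sig c hc]
      simp only [hc, if_pos]
      rw [ih ds _ hnd, pvIdxOf_foldl_add l ds c hc, List.append_assoc]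
      rfl
    · have hnd2 : (ds ++ [c]).Nodup := by
        simp [List.nodup_append, hnd]
        exact fun a ha h => hc (h ▸ ha)
      rw [pvStepA_new ds hnd sig c hc]
      simp only [hc, if_false]
      rw [ih (ds ++ [c]) _ hnd2, pvIdxOf_foldl_add l (ds ++ [c]) c (by simp),
          List.append_assoc]
      rfl

-- ---- B's positional count equals the first-appearance rank ----
-- the prefix of l strictly before the first occurrence of c does not contain c
theorem pvNotMemTakeIdxOf (l : List Char) (c : Char) : c ∉ l.take (l.idxOf c) := by
  induction l with
  | nil => simp
  | cons a l ih =>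
    by_cases hac : a = c
    · subst hac; simp [List.idxOf_cons_self]
    · rw [List.idxOf_cons_ne _ (by simpa using hac), List.take_succ_cons]
      intro hmem
      rcases List.mem_cons.1 hmem with h | h
      · exact hac h.symm
      · exact ih h

theorem pvIdxOfAppendSingleton (xs : List Char) (c : Char) (hc : c ∉ xs) :
    (xs ++ [c]).idxOf c = xs.length := by
  induction xs with
  | nil => simp [List.idxOf_cons_self]
  | cons a xs ih =>
    have hac : a ≠ c := fun h => hc (h ▸ List.mem_cons_self)
    rw [List.cons_append, List.idxOf_cons_ne _ (by simpa using hac),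
        ih (fun h => hc (List.mem_cons_of_mem _ h))]
    rfl

-- core: for c ∈ l, first-appearance rank of c = number of distinct chars before c's first occurrence
theorem pvRankEq (l : List Char) (c : Char) (hc : c ∈ l) :
    (PySem.List.dedup l).idxOf c = (PySem.Set.ofList (l.take (l.idxOf c))).length := by
  set k := l.idxOf c with hk
  have hklt : k < l.length := List.idxOf_lt_length_of_mem hc
  have hget : l[k] = c := List.getElem_idxOf hklt
  have hdecomp : l = l.take k ++ c :: l.drop (k + 1) := by
    conv_lhs => rw [← List.take_append_drop k l]
    rw [List.drop_eq_getElem_cons hklt, hget]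
  have hnp : c ∉ l.take k := pvNotMemTakeIdxOf l c
  have hnp' : c ∉ (l.take k).foldl PySem.Set.add [] := by
    rw [← PySem.Set.ofList_eq_foldl]
    rw [PySem.Set.mem_ofList]
    exact hnp
  rw [PySem.List.dedup_eq_ofList, PySem.Set.ofList_eq_foldl, PySem.Set.ofList_eq_foldl]
  conv_lhs => rw [hdecomp]
  rw [List.foldl_append, List.foldl_cons, pvSet_add_eq]
  simp only [hnp', if_false]
  rw [pvIdxOf_foldl_add _ _ c (by simp), pvIdxOfAppendSingleton _ c hnp']

-- ===== VERDICT (by name: the statement is the Claim_ definition above) =====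
theorem get_word_signature_spec : Claim_equal_get_word_signature := by
  intro word _
  unfold Spec_get_word_signature get_word_signature get_word_signature_alt
  have hA : (word.toList.foldl pvStepA (PySem.Dict.empty, (65 : Int), [])).2.2
      = word.toList.map (fun c => Char.ofNat (65 + (PySem.List.dedup word.toList).idxOf c)) := by
    have h := pvLoopA word.toList [] [] List.nodup_nil
    rw [← pvDedup_eq_foldl_add] at h
    simpa using h
  show String.ofList (word.toList.foldl pvStepA (PySem.Dict.empty, (65 : Int), [])).2.2 = _
  rw [hA]
  congr 1
  apply List.map_congr_left
  intro c hcmem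
  rw [pvRankEq word.toList c hcmem]
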